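-- pv_equiv track=rewrite | github.com/AmongFox/Django-site | mysite/requestdataapp/misc.py | check_file_type
-- ===== SOURCE A (Python) =====
-- file_extensions = {
--     "image_type": ['.jpg', '.jpeg', '.png', '.gif'],
--     "video_type": ['.mp4', '.avi', '.mov'],
--     "docs_type": ['.txt', '.doc', '.pdf'],
--     "audio_type": ['.mp3', '.wav', '.aac', '.flac', '.ogg']
-- }
--
-- def check_file_type(file_name: str) -> str:
--     if any(file_name.endswith(file_type) for file_type in file_extensions["image_type"]):
--         return "data/images"
--
--     elif any(file_name.endswith(file_type) for file_type in file_extensions["video_type"]):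
--         return "data/video"
--
--     elif any(file_name.endswith(file_type) for file_type in file_extensions["docs_type"]):
--         return "data/docs"
--
--     elif any(file_name.endswith(file_type) for file_type in file_extensions["audio_type"]):
--         return "data/audio"
--
--     else:
--         return "data/misc"
-- ===== SOURCE B (Python) =====
-- _DIR_BY_EXT = {
--     '.jpg': 'data/images', '.jpeg': 'data/images', '.png': 'data/images', '.gif': 'data/images',
--     '.mp4': 'data/video', '.avi': 'data/video', '.mov': 'data/video',
--     '.txt': 'data/docs', '.doc': 'data/docs', '.pdf': 'data/docs',
--     '.mp3': 'data/audio', '.wav': 'data/audio', '.aac': 'data/audio', '.flac': 'data/audio', '.ogg': 'data/audio',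
-- }
--
--
-- def check_file_type(file_name: str) -> str:
--     if '.' not in file_name:
--         return 'data/misc'
--     key = '.' + file_name.rsplit('.', 1)[-1]
--     return _DIR_BY_EXT.get(key, 'data/misc')
-- ===== Notes on version B (the rewrite author's own statement) =====
-- stated objective: idiomatic
-- what changed: Replaces the four sequential any(endswith) scans over grouped extension lists with a single flat extension->directory dict: extract the suffix after the last dot once and do one lookup with a 'data/misc' default.
import Mathlib
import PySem

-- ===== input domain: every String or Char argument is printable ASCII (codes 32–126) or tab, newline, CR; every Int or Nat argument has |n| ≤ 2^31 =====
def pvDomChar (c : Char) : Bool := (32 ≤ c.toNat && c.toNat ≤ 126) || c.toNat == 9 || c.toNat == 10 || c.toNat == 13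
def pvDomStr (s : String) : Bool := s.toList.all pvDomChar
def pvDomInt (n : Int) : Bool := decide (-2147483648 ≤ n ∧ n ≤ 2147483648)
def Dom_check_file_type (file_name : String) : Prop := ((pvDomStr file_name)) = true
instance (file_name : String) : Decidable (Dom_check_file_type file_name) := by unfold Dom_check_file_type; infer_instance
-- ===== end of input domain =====

-- B replaces A's four grouped any(endswith) scans by one flat extension→directory dict lookup on
-- the suffix after the last dot (idiomatic restructuring; same results on every input).

-- ===== PORT A =====
def file_extensions : PySem.Dict String (List String) := PySem.Dict.ofList
  [ ("image_type", [".jpg", ".jpeg", ".png", ".gif"]),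
    ("video_type", [".mp4", ".avi", ".mov"]),
    ("docs_type",  [".txt", ".doc", ".pdf"]),
    ("audio_type", [".mp3", ".wav", ".aac", ".flac", ".ogg"]) ]

def check_file_type (file_name : String) : String :=
  if (file_extensions.getD "image_type" []).any (fun ft => PySem.Str.endswith file_name ft) then
    "data/images"
  else if (file_extensions.getD "video_type" []).any (fun ft => PySem.Str.endswith file_name ft) then
    "data/video"
  else if (file_extensions.getD "docs_type" []).any (fun ft => PySem.Str.endswith file_name ft) then
    "data/docs"
  else if (file_extensions.getD "audio_type" []).any (fun ft => PySem.Str.endswith file_name ft) then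
    "data/audio"
  else
    "data/misc"

-- ===== PORT B =====
-- _DIR_BY_EXT; string keys are compared as their code-point lists (exact for Python str equality)
def dirByExt : PySem.Dict (List Char) String := PySem.Dict.ofList
  [ (".jpg".toList, "data/images"), (".jpeg".toList, "data/images"), (".png".toList, "data/images"), (".gif".toList, "data/images"), (".mp4".toList, "data/video"), (".avi".toList, "data/video"), (".mov".toList, "data/video"), (".txt".toList, "data/docs"), (".doc".toList, "data/docs"), (".pdf".toList, "data/docs"), (".mp3".toList, "data/audio"), (".wav".toList, "data/audio"), (".aac".toList, "data/audio"), (".flac".toList, "data/audio"), (".ogg".toList, "data/audio") ]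

def check_file_type_alt (file_name : String) : String :=
  if PySem.Str.isIn "." file_name then
    -- key = '.' + file_name.rsplit('.', 1)[-1]: '.' plus the characters after the LAST '.'
    -- (exact hand port of rsplit('.', 1)[-1] as takeWhile (≠ '.') on the reversed characters)
    dirByExt.getD ('.' :: (file_name.toList.reverse.takeWhile (fun c => c != '.')).reverse) "data/misc"
  else
    "data/misc"

-- ===== PRECONDITION & SPEC =====
def Spec_check_file_type (file_name : String) (out : String) : Prop := out = check_file_type_alt file_name
instance (file_name : String) (out : String) : Decidable (Spec_check_file_type file_name out) := by unfold Spec_check_file_type; infer_instance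

-- ===== CLAIM (what is proved, stated in full; the proofs are below) =====
def Claim_equal_check_file_type : Prop := ∀ (file_name : String), Dom_check_file_type file_name → Spec_check_file_type file_name (check_file_type file_name)

-- ===== LEMMAS AND PROOFS =====

-- the segment after the last '.': takeWhile on the reverse hits t exactly when the reverse starts with t ++ ['.']
lemma seg_iff (t : List Char) (ht : '.' ∉ t) : ∀ (r : List Char),
    ('.' ∈ r ∧ r.takeWhile (fun c => c != '.') = t) ↔ r.take (t.length + 1) = t ++ ['.'] := by
  induction t with
  | nil =>
      intro r
      cases r with
      | nil => simp
      | cons c r' =>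
          by_cases hc : c = '.' <;> simp [hc]
  | cons a t' ih =>
      intro r
      have ha : a ≠ '.' := by simp at ht; exact fun h => ht.1 h.symm
      have ht' : '.' ∉ t' := by simp at ht; exact ht.2
      cases r with
      | nil => simp
      | cons c r' =>
          by_cases hc : c = '.'
          · subst hc
            simp [Ne.symm ha]
          · constructor
            · rintro ⟨hmem, htw⟩
              have hmem' : '.' ∈ r' := by
                rcases List.mem_cons.mp hmem with h | h
                · exact absurd h.symm hc
                · exact h
              simp [hc] at htw
              simp [htw.1, List.take_succ_cons]
              exact ((ih ht' r').mp ⟨hmem', htw.2⟩)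
            · intro hrhs
              simp [List.take_succ_cons] at hrhs
              have hih := (ih ht' r').mpr hrhs.2
              refine ⟨List.mem_cons_of_mem _ hih.1, ?_⟩
              simp [hrhs.1, hih.2, ha]

-- A's endswith test, rephrased through the segment after the last dot
lemma endswith_iff_seg (cs : List Char) (t : List Char) (ht : '.' ∉ t) :
    PySem.Chars.endswith cs ('.' :: t) = true ↔
      ('.' ∈ cs.reverse ∧ cs.reverse.takeWhile (fun c => c != '.') = t.reverse) := by
  rw [PySem.Chars.endswith_iff]
  have ht' : '.' ∉ t.reverse := by simpa using ht
  rw [seg_iff t.reverse ht' cs.reverse]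
  constructor
  · intro h
    have hp : ('.' :: t).reverse <+: cs.reverse := List.reverse_prefix.mpr h
    have := List.prefix_iff_eq_take.mp hp
    simpa [List.length_reverse] using this.symm
  · intro h
    have hp : ('.' :: t).reverse <+: cs.reverse := by
      rw [List.prefix_iff_eq_take]
      simpa [List.length_reverse] using h.symm
    exact List.reverse_prefix.mp hp

-- ===== VERDICT (by name: the statement is the Claim_ definition above) =====
theorem check_file_type_spec : Claim_equal_check_file_type := by
  intro s _
  unfold Spec_check_file_type check_file_type check_file_type_alt
  have h1 : file_extensions.getD "image_type" [] = [".jpg", ".jpeg", ".png", ".gif"] := by decide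
  have h2 : file_extensions.getD "video_type" [] = [".mp4", ".avi", ".mov"] := by decide
  have h3 : file_extensions.getD "docs_type" [] = [".txt", ".doc", ".pdf"] := by decide
  have h4 : file_extensions.getD "audio_type" [] = [".mp3", ".wav", ".aac", ".flac", ".ogg"] := by decide
  by_cases hdot : '.' ∈ s.toList
  · -- has a dot: both sides are determined by the segment after the last dot
    have hIn : PySem.Str.isIn "." s = true := by
      rw [PySem.Str.isIn_iff_infix]
      simpa using (List.singleton_infix_iff '.' s.toList).mpr hdot
    have hdr : '.' ∈ s.toList.reverse := by simpa using hdot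
    have hD : dirByExt = PySem.Dict.mk
        [ (".jpg".toList, "data/images"), (".jpeg".toList, "data/images"), (".png".toList, "data/images"), (".gif".toList, "data/images"), (".mp4".toList, "data/video"), (".avi".toList, "data/video"), (".mov".toList, "data/video"), (".txt".toList, "data/docs"), (".doc".toList, "data/docs"), (".pdf".toList, "data/docs"), (".mp3".toList, "data/audio"), (".wav".toList, "data/audio"), (".aac".toList, "data/audio"), (".flac".toList, "data/audio"), (".ogg".toList, "data/audio") ] := by decide
    rw [if_pos hIn]
    set v := (s.toList.reverse.takeWhile (fun c => c != '.')).reverse with hv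
    have hcond : ∀ (t : List Char), '.' ∉ t →
        (PySem.Chars.endswith s.toList ('.' :: t) = true ↔ v = t) := by
      intro t ht
      rw [endswith_iff_seg s.toList t ht, hv]
      constructor
      · rintro ⟨_, h⟩; exact List.reverse_eq_iff.mpr h
      · intro h; exact ⟨hdr, List.reverse_eq_iff.mp h⟩
    have e1 : PySem.Chars.endswith s.toList ".jpg".toList = true ↔ v = ['j', 'p', 'g'] := by
      simpa using hcond ['j', 'p', 'g'] (by decide)
    have e2 : PySem.Chars.endswith s.toList ".jpeg".toList = true ↔ v = ['j', 'p', 'e', 'g'] := by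
      simpa using hcond ['j', 'p', 'e', 'g'] (by decide)
    have e3 : PySem.Chars.endswith s.toList ".png".toList = true ↔ v = ['p', 'n', 'g'] := by
      simpa using hcond ['p', 'n', 'g'] (by decide)
    have e4 : PySem.Chars.endswith s.toList ".gif".toList = true ↔ v = ['g', 'i', 'f'] := by
      simpa using hcond ['g', 'i', 'f'] (by decide)
    have e5 : PySem.Chars.endswith s.toList ".mp4".toList = true ↔ v = ['m', 'p', '4'] := by
      simpa using hcond ['m', 'p', '4'] (by decide)
    have e6 : PySem.Chars.endswith s.toList ".avi".toList = true ↔ v = ['a', 'v', 'i'] := by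
      simpa using hcond ['a', 'v', 'i'] (by decide)
    have e7 : PySem.Chars.endswith s.toList ".mov".toList = true ↔ v = ['m', 'o', 'v'] := by
      simpa using hcond ['m', 'o', 'v'] (by decide)
    have e8 : PySem.Chars.endswith s.toList ".txt".toList = true ↔ v = ['t', 'x', 't'] := by
      simpa using hcond ['t', 'x', 't'] (by decide)
    have e9 : PySem.Chars.endswith s.toList ".doc".toList = true ↔ v = ['d', 'o', 'c'] := by
      simpa using hcond ['d', 'o', 'c'] (by decide)
    have e10 : PySem.Chars.endswith s.toList ".pdf".toList = true ↔ v = ['p', 'd', 'f'] := by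
      simpa using hcond ['p', 'd', 'f'] (by decide)
    have e11 : PySem.Chars.endswith s.toList ".mp3".toList = true ↔ v = ['m', 'p', '3'] := by
      simpa using hcond ['m', 'p', '3'] (by decide)
    have e12 : PySem.Chars.endswith s.toList ".wav".toList = true ↔ v = ['w', 'a', 'v'] := by
      simpa using hcond ['w', 'a', 'v'] (by decide)
    have e13 : PySem.Chars.endswith s.toList ".aac".toList = true ↔ v = ['a', 'a', 'c'] := by
      simpa using hcond ['a', 'a', 'c'] (by decide)
    have e14 : PySem.Chars.endswith s.toList ".flac".toList = true ↔ v = ['f', 'l', 'a', 'c'] := by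
      simpa using hcond ['f', 'l', 'a', 'c'] (by decide)
    have e15 : PySem.Chars.endswith s.toList ".ogg".toList = true ↔ v = ['o', 'g', 'g'] := by
      simpa using hcond ['o', 'g', 'g'] (by decide)
    split_ifs with hA1 hA2 hA3 hA4
    · simp only [h1, List.any_cons, List.any_nil, Bool.or_false, Bool.or_eq_true, PySem.Str.endswith_eq, e1, e2, e3, e4] at hA1
      rcases hA1 with h|h|h|h <;> rw [h] <;> decide
    · simp only [h2, List.any_cons, List.any_nil, Bool.or_false, Bool.or_eq_true, PySem.Str.endswith_eq, e5, e6, e7] at hA2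
      rcases hA2 with h|h|h <;> rw [h] <;> decide
    · simp only [h3, List.any_cons, List.any_nil, Bool.or_false, Bool.or_eq_true, PySem.Str.endswith_eq, e8, e9, e10] at hA3
      rcases hA3 with h|h|h <;> rw [h] <;> decide
    · simp only [h4, List.any_cons, List.any_nil, Bool.or_false, Bool.or_eq_true, PySem.Str.endswith_eq, e11, e12, e13, e14, e15] at hA4
      rcases hA4 with h|h|h|h|h <;> rw [h] <;> decide
    · -- no extension matched: the dict lookup falls through to the default
      simp only [h1, h2, h3, h4, List.any_cons, List.any_nil, Bool.or_false, Bool.or_eq_true,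
        PySem.Str.endswith_eq, e1, e2, e3, e4, e5, e6, e7, e8, e9, e10, e11, e12, e13, e14, e15,
        not_or] at hA1 hA2 hA3 hA4
      obtain ⟨n1, n2, n3, n4⟩ := hA1
      obtain ⟨n5, n6, n7⟩ := hA2
      obtain ⟨n8, n9, n10⟩ := hA3
      obtain ⟨n11, n12, n13, n14, n15⟩ := hA4
      simp only [hD, PySem.Dict.getD_eq_get?_getD, PySem.Dict.get?_mk_cons, beq_iff_eq]
      simp [PySem.Dict.get?, List.cons.injEq, Ne.symm n1, Ne.symm n2, Ne.symm n3, Ne.symm n4, Ne.symm n5, Ne.symm n6, Ne.symm n7, Ne.symm n8, Ne.symm n9, Ne.symm n10, Ne.symm n11, Ne.symm n12, Ne.symm n13, Ne.symm n14, Ne.symm n15]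
  · -- no dot: every endswith is false and B's membership test is false: both return "data/misc"
    have hIn : PySem.Str.isIn "." s = false := by
      rw [Bool.eq_false_iff]
      intro h
      rw [PySem.Str.isIn_iff_infix] at h
      exact hdot ((List.singleton_infix_iff '.' s.toList).mp (by simpa using h))
    have hend : ∀ (t : List Char), PySem.Chars.endswith s.toList ('.' :: t) = false := by
      intro t
      rw [Bool.eq_false_iff]
      intro h
      rw [PySem.Chars.endswith_iff] at h
      exact hdot (h.subset (List.mem_cons_self ..))
    have f1 : PySem.Chars.endswith s.toList ".jpg".toList = false := hend ['j', 'p', 'g']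
    have f2 : PySem.Chars.endswith s.toList ".jpeg".toList = false := hend ['j', 'p', 'e', 'g']
    have f3 : PySem.Chars.endswith s.toList ".png".toList = false := hend ['p', 'n', 'g']
    have f4 : PySem.Chars.endswith s.toList ".gif".toList = false := hend ['g', 'i', 'f']
    have f5 : PySem.Chars.endswith s.toList ".mp4".toList = false := hend ['m', 'p', '4']
    have f6 : PySem.Chars.endswith s.toList ".avi".toList = false := hend ['a', 'v', 'i']
    have f7 : PySem.Chars.endswith s.toList ".mov".toList = false := hend ['m', 'o', 'v']
    have f8 : PySem.Chars.endswith s.toList ".txt".toList = false := hend ['t', 'x', 't']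
    have f9 : PySem.Chars.endswith s.toList ".doc".toList = false := hend ['d', 'o', 'c']
    have f10 : PySem.Chars.endswith s.toList ".pdf".toList = false := hend ['p', 'd', 'f']
    have f11 : PySem.Chars.endswith s.toList ".mp3".toList = false := hend ['m', 'p', '3']
    have f12 : PySem.Chars.endswith s.toList ".wav".toList = false := hend ['w', 'a', 'v']
    have f13 : PySem.Chars.endswith s.toList ".aac".toList = false := hend ['a', 'a', 'c']
    have f14 : PySem.Chars.endswith s.toList ".flac".toList = false := hend ['f', 'l', 'a', 'c']
    have f15 : PySem.Chars.endswith s.toList ".ogg".toList = false := hend ['o', 'g', 'g']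
    simp only [h1, h2, h3, h4, List.any_cons, List.any_nil, Bool.or_false,
      PySem.Str.endswith_eq, f1, f2, f3, f4, f5, f6, f7, f8, f9, f10, f11, f12, f13, f14, f15, hIn]
    simp
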